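-- pv_equiv track=rewrite | github.com/frodopackets/kirolearning | sharepoint_sync.py | create_permission_summary
-- ===== SOURCE A (Python) =====
-- from typing import Dict, Any, List, Optional
--
-- def create_permission_summary(permission_levels: Dict[str, Any]) -> str:
--     """Create a summary of permission levels for advanced filtering."""
--     summary_parts = []
--     for principal, details in permission_levels.items():
--         permissions = details.get('permissions', [])
--         if permissions:
--             highest_permission = get_highest_permission(permissions)
--             summary_parts.append(f"{principal}:{highest_permission}")
--     return '|'.join(summary_parts)
--
-- def get_highest_permission(permissions: List[str]) -> str:
--     """Determine the highest permission level from a list."""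
--     permission_hierarchy = ['read', 'contribute', 'design', 'full_control']
--     for perm in reversed(permission_hierarchy):
--         if perm in [p.lower() for p in permissions]:
--             return perm
--     return 'read'  # Default to read if no match
-- ===== SOURCE B (Python) =====
-- # B: rank-table single pass over the permissions instead of scanning the hierarchy with repeated lowered-list rebuilds.
-- _HIERARCHY = ['read', 'contribute', 'design', 'full_control']
-- _RANK = {level: i for i, level in enumerate(_HIERARCHY)}
--
-- def get_highest_permission(permissions):
--     best = 0
--     for p in permissions:
--         best = max(best, _RANK.get(p.lower(), 0))
--     return _HIERARCHY[best]
--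
-- def create_permission_summary(permission_levels):
--     return '|'.join(
--         f"{principal}:{get_highest_permission(details.get('permissions', []))}"
--         for principal, details in permission_levels.items()
--         if details.get('permissions', [])
--     )
-- ===== Notes on version B (the rewrite author's own statement) =====
-- stated objective: idiomatic
-- what changed: get_highest_permission now makes one pass over the permissions list tracking the maximum rank from a precomputed rank table, instead of scanning the hierarchy and rebuilding the lowered permission list for each hierarchy level; the outer loop becomes a comprehension.
import Mathlib
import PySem

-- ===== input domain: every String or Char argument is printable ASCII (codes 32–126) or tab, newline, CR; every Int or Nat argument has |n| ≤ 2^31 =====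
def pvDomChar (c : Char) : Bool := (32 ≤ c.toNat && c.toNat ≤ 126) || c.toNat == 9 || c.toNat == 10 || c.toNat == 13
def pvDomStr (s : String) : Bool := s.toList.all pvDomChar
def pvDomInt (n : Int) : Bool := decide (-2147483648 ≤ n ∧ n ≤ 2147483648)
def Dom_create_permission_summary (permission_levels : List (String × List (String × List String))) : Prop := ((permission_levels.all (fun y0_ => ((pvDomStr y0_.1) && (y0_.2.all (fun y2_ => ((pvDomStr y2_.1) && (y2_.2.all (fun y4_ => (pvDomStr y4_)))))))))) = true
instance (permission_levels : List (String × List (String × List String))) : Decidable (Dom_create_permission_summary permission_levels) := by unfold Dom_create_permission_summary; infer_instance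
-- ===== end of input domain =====

-- B changes only the helper: one pass over the permissions with a rank table instead of scanning the
-- hierarchy with a rebuilt lowered list per level (idiomatic; return value only, no side effects).

-- ===== PORT A =====
-- get_highest_permission: for perm in reversed(hierarchy): if perm in [p.lower() for p in permissions]: return perm
def pvGetHighestA (permissions : List String) : String :=
  match (["full_control", "design", "contribute", "read"].find?
      (fun perm => (permissions.map PySem.Str.lower).contains perm)) with
  | some perm => perm
  | none => "read"

def create_permission_summary (permission_levels : List (String × List (String × List String))) : String :=
  let summary_parts := permission_levels.foldl (fun acc pd =>
    if !((PySem.Dict.mk pd.2).getD "permissions" []).isEmpty then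
      acc ++ [pd.1 ++ ":" ++ pvGetHighestA ((PySem.Dict.mk pd.2).getD "permissions" [])]
    else acc) []
  PySem.Str.join "|" summary_parts

-- ===== PORT B =====
-- _RANK = {level: i for i, level in enumerate(_HIERARCHY)}
def pvRankDict : PySem.Dict String Nat :=
  PySem.Dict.mk [("read", 0), ("contribute", 1), ("design", 2), ("full_control", 3)]

def pvGetHighestB (permissions : List String) : String :=
  let best := permissions.foldl (fun b p => max b (pvRankDict.getD (PySem.Str.lower p) 0)) 0
  ["read", "contribute", "design", "full_control"].getD best "read"

def create_permission_summary_alt (permission_levels : List (String × List (String × List String))) : String :=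
  PySem.Str.join "|"
    ((permission_levels.filter
        (fun pd => !((PySem.Dict.mk pd.2).getD "permissions" []).isEmpty)).map
      (fun pd => pd.1 ++ ":" ++ pvGetHighestB ((PySem.Dict.mk pd.2).getD "permissions" [])))

-- ===== PRECONDITION & SPEC =====
def Spec_create_permission_summary (permission_levels : List (String × List (String × List String))) (out : String) : Prop := out = create_permission_summary_alt permission_levels
instance (permission_levels : List (String × List (String × List String))) (out : String) : Decidable (Spec_create_permission_summary permission_levels out) := by unfold Spec_create_permission_summary; infer_instance

-- ===== CLAIM (what is proved, stated in full; the proofs are below) =====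
def Claim_equal_create_permission_summary : Prop := ∀ (permission_levels : List (String × List (String × List String))), Dom_create_permission_summary permission_levels → Spec_create_permission_summary permission_levels (create_permission_summary permission_levels)

-- ===== LEMMAS AND PROOFS =====

-- the rank table as an explicit if-chain on the (lowered) permission string
lemma pvRank_eq (s : String) : pvRankDict.getD s 0 =
    (if s = "full_control" then 3 else if s = "design" then 2 else if s = "contribute" then 1 else 0) := by
  by_cases h1 : s = "full_control"
  · subst h1; decide
  rw [if_neg h1]
  by_cases h2 : s = "design"
  · subst h2; decide
  rw [if_neg h2]
  by_cases h3 : s = "contribute"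
  · subst h3; decide
  rw [if_neg h3]
  by_cases h4 : s = "read"
  · subst h4; decide
  simp only [pvRankDict, PySem.Dict.getD_eq_get?_getD, PySem.Dict.get?_mk_cons, beq_iff_eq]
  rw [if_neg (fun h => h4 h.symm), if_neg (fun h => h3 h.symm), if_neg (fun h => h2 h.symm),
    if_neg (fun h => h1 h.symm)]
  rfl

-- shifting the accumulator of the running max out
lemma pvFold_max_shift (l : List String) (a : Nat) :
    l.foldl (fun b p => max b (pvRankDict.getD (PySem.Str.lower p) 0)) a
      = max a (l.foldl (fun b p => max b (pvRankDict.getD (PySem.Str.lower p) 0)) 0) := by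
  induction l generalizing a with
  | nil => simp
  | cons p l ih =>
    simp only [List.foldl_cons]
    rw [ih, ih (max 0 _)]
    omega

-- the running max characterised by membership in the lowered list
lemma pvFold_max_char (l : List String) :
    l.foldl (fun b p => max b (pvRankDict.getD (PySem.Str.lower p) 0)) 0
      = (if (l.map PySem.Str.lower).contains "full_control" then 3
         else if (l.map PySem.Str.lower).contains "design" then 2
         else if (l.map PySem.Str.lower).contains "contribute" then 1 else 0) := by
  induction l with
  | nil => simp
  | cons p l ih =>
    simp only [List.foldl_cons]
    rw [pvFold_max_shift, ih]
    simp only [List.map_cons, List.contains_cons, pvRank_eq]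
    by_cases h1 : PySem.Str.lower p = "full_control"
    · simp [h1]
      split_ifs <;> omega
    by_cases h2 : PySem.Str.lower p = "design"
    · simp [h2]
      split_ifs <;> omega
    by_cases h3 : PySem.Str.lower p = "contribute"
    · simp [h3]
      split_ifs <;> omega
    · simp [Ne.symm h1, Ne.symm h2, Ne.symm h3, h1, h2, h3]

-- the two helpers agree
lemma pvHighest_eq (perms : List String) : pvGetHighestA perms = pvGetHighestB perms := by
  unfold pvGetHighestA pvGetHighestB
  rw [pvFold_max_char]
  by_cases h1 : (perms.map PySem.Str.lower).contains "full_control" = true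
  · rw [List.find?_cons_of_pos (by simpa using h1), if_pos h1]
    rfl
  · rw [List.find?_cons_of_neg (by simpa using h1), if_neg h1]
    by_cases h2 : (perms.map PySem.Str.lower).contains "design" = true
    · rw [List.find?_cons_of_pos (by simpa using h2), if_pos h2]
      rfl
    · rw [List.find?_cons_of_neg (by simpa using h2), if_neg h2]
      by_cases h3 : (perms.map PySem.Str.lower).contains "contribute" = true
      · rw [List.find?_cons_of_pos (by simpa using h3), if_pos h3]
        rfl
      · rw [List.find?_cons_of_neg (by simpa using h3), if_neg h3]
        by_cases h4 : (perms.map PySem.Str.lower).contains "read" = true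
        · rw [List.find?_cons_of_pos (by simpa using h4)]
          rfl
        · rw [List.find?_cons_of_neg (by simpa using h4)]
          rfl

-- ===== VERDICT (by name: the statement is the Claim_ definition above) =====
theorem create_permission_summary_spec : Claim_equal_create_permission_summary := by
  intro levels _
  unfold Spec_create_permission_summary create_permission_summary create_permission_summary_alt
  rw [PySem.List.foldl_append_if
    (p := fun pd : String × List (String × List String) => !((PySem.Dict.mk pd.2).getD "permissions" []).isEmpty)
    (f := fun pd : String × List (String × List String) => pd.1 ++ ":" ++ pvGetHighestA ((PySem.Dict.mk pd.2).getD "permissions" []))]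
  simp [pvHighest_eq]
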